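-- pv_equiv track=rewrite | github.com/herzenuni/sem6-finaltask-230618-kserjey | main.py | count
-- ===== SOURCE A (Python) =====
-- from types import SimpleNamespace
--
-- def count(string):
--   state = SimpleNamespace(current_word='', is_space=False)
--
--   for char in string:
--     if not char.isspace():
--       state.is_space = False
--       state.current_word += char
--     elif not state.is_space:
--       yield len(state.current_word)
--       state.is_space = True
--       state.current_word = ''
--
--   yield len(state.current_word)
-- ===== SOURCE B (Python) =====
-- def count(string):
--     # Run-based two-pointer scan over maximal space/word runs instead of a
--     # char-by-char state machine.
--     n = len(string)
--     current = 0
--     i = 0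
--     while i < n:
--         j = i
--         if string[i].isspace():
--             while j < n and string[j].isspace():
--                 j += 1
--             yield current
--             current = 0
--         else:
--             while j < n and not string[j].isspace():
--                 j += 1
--             current = j - i
--         i = j
--     yield current
-- ===== Notes on version B (the rewrite author's own statement) =====
-- stated objective: faster
-- what changed: Replaced the char-by-char SimpleNamespace state machine that accumulates the current word as a growing string with a two-pointer scan over maximal whitespace/word runs that keeps only an integer word length.
import Mathlib
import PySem

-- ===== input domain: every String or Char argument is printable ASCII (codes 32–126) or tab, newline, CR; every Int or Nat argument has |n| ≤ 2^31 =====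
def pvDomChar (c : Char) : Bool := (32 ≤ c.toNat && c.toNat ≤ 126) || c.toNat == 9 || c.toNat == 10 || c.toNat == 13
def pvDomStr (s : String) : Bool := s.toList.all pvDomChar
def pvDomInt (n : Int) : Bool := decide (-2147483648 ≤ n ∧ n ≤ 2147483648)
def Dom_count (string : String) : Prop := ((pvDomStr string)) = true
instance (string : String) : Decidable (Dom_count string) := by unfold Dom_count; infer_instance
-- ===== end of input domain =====

-- B replaces A's char-by-char state machine with a run-based scan keeping only an integer; return values proved equal.

-- ===== PORT A =====
-- state = (current_word, is_space, yields so far); final yield appended at the end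
def countStep (st : List Char × Bool × List Int) (c : Char) : List Char × Bool × List Int :=
  if !(PySem.Chars.isspace c) then (st.1 ++ [c], false, st.2.2)
  else if !st.2.1 then ([], true, st.2.2 ++ [(st.1.length : Int)])
  else st

def count (string : String) : List Int :=
  let st := string.toList.foldl countStep ([], false, [])
  st.2.2 ++ [(st.1.length : Int)]

-- ===== PORT B =====
-- scan maximal runs: a space run emits `current` and resets it; a word run sets `current` to its length
def countAltGo (l : List Char) (current : Int) : List Int :=
  match l with
  | [] => [current]
  | c :: rest =>
    if PySem.Chars.isspace c then
      current :: countAltGo (rest.dropWhile (fun x => PySem.Chars.isspace x)) 0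
    else
      countAltGo (rest.dropWhile (fun x => !PySem.Chars.isspace x))
        (1 + ((rest.takeWhile (fun x => !PySem.Chars.isspace x)).length : Int))
termination_by l.length
decreasing_by
  · exact Nat.lt_succ_of_le (rest.length_dropWhile_le _)
  · exact Nat.lt_succ_of_le (rest.length_dropWhile_le _)

def count_alt (string : String) : List Int := countAltGo string.toList 0

-- ===== PRECONDITION & SPEC =====
def Spec_count (string : String) (out : List Int) : Prop := out = count_alt string
instance (string : String) (out : List Int) : Decidable (Spec_count string out) := by unfold Spec_count; infer_instance

-- ===== CLAIM (what is proved, stated in full; the proofs are below) =====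
def Claim_equal_count : Prop := ∀ (string : String), Dom_count string → Spec_count string (count string)

-- ===== LEMMAS AND PROOFS =====

-- a run of spaces is a no-op for A once is_space is set
theorem foldA_space_nop (g : List Char) (o : List Int)
    (h : ∀ x ∈ g, PySem.Chars.isspace x = true) :
    g.foldl countStep ([], true, o) = ([], true, o) := by
  induction g with
  | nil => rfl
  | cons c rest ih =>
    have hc := h c (by simp)
    simp only [List.foldl_cons, countStep, hc]
    exact ih (fun x hx => h x (by simp [hx]))

-- a run of non-space chars appends them to current_word and clears is_space
theorem foldA_word (g : List Char) (cw : List Char) (o : List Int)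
    (h : ∀ x ∈ g, PySem.Chars.isspace x = false) :
    g.foldl countStep (cw, false, o) = (cw ++ g, false, o) := by
  induction g generalizing cw with
  | nil => simp
  | cons c rest ih =>
    have hc := h c (by simp)
    have hstep : countStep (cw, false, o) c = (cw ++ [c], false, o) := by
      simp [countStep, hc]
    rw [List.foldl_cons, hstep, ih (cw ++ [c]) (fun x hx => h x (by simp [hx]))]
    simp

theorem head?_dropWhile (p : Char → Bool) (l : List Char) :
    ∀ a, (l.dropWhile p).head? = some a → p a = false := by
  induction l with
  | nil => simp
  | cons c rest ih =>
    intro a ha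
    by_cases hc : p c = true
    · rw [List.dropWhile_cons_of_pos hc] at ha; exact ih a ha
    · rw [List.dropWhile_cons_of_neg hc] at ha
      simp at ha; subst ha; simpa using hc

theorem main_lemma : ∀ (n : Nat) (l : List Char), l.length ≤ n →
    ∀ (cw : List Char) (sp : Bool) (out : List Int),
    (sp = true → cw = [] ∧ ∀ a, l.head? = some a → PySem.Chars.isspace a = false) →
    (cw ≠ [] → ∀ a, l.head? = some a → PySem.Chars.isspace a = true) →
    (let st := l.foldl countStep (cw, sp, out)
     st.2.2 ++ [(st.1.length : Int)]) = out ++ countAltGo l (cw.length : Int) := by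
  intro n
  induction n with
  | zero =>
    intro l hl cw sp out _ _
    have : l = [] := List.eq_nil_of_length_eq_zero (Nat.le_zero.mp hl)
    subst this; simp [countAltGo]
  | succ n ih =>
    intro l hl cw sp out hsp hcw
    match l with
    | [] => simp [countAltGo]
    | c :: rest =>
      by_cases hk : PySem.Chars.isspace c = true
      · -- space run: A must have sp = false here
        have hspf : sp = false := by
          cases sp
          · rfl
          · exact absurd ((hsp rfl).2 c rfl) (by simp [hk])
        subst hspf
        have hstep : countStep (cw, false, out) c = ([], true, out ++ [(cw.length : Int)]) := by
          simp [countStep, hk]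
        rw [List.foldl_cons, hstep]
        -- split rest into the space run and the remainder
        have hsplit : rest = rest.takeWhile (fun x => PySem.Chars.isspace x)
            ++ rest.dropWhile (fun x => PySem.Chars.isspace x) :=
          (List.takeWhile_append_dropWhile).symm
        rw [hsplit, List.foldl_append,
          foldA_space_nop _ _ (fun x hx => by
            have := List.mem_takeWhile_imp hx; simpa using this)]
        have hlen : (rest.dropWhile (fun x => PySem.Chars.isspace x)).length ≤ n := by
          have h1 := rest.length_dropWhile_le (fun x => PySem.Chars.isspace x)
          have h2 : rest.length ≤ n := by simpa using Nat.succ_le_succ_iff.mp hl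
          omega
        rw [ih _ hlen [] true (out ++ [(cw.length : Int)])
          (fun _ => ⟨rfl, head?_dropWhile _ rest⟩) (by simp)]
        simp [countAltGo, hk]
      · -- word run: cw must be empty here
        have hcwnil : cw = [] := by
          by_contra h
          exact absurd (hcw h c rfl) (by simpa using hk)
        subst hcwnil
        have hstep : countStep (([] : List Char), sp, out) c = ([c], false, out) := by
          simp [countStep, hk]
        rw [List.foldl_cons, hstep]
        have hsplit : rest = rest.takeWhile (fun x => !PySem.Chars.isspace x)
            ++ rest.dropWhile (fun x => !PySem.Chars.isspace x) :=
          (List.takeWhile_append_dropWhile).symm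
        rw [hsplit, List.foldl_append,
          foldA_word _ [c] out (fun x hx => by
            have := List.mem_takeWhile_imp hx; simpa using this)]
        have hlen : (rest.dropWhile (fun x => !PySem.Chars.isspace x)).length ≤ n := by
          have h1 := rest.length_dropWhile_le (fun x => !PySem.Chars.isspace x)
          have h2 : rest.length ≤ n := by simpa using Nat.succ_le_succ_iff.mp hl
          omega
        rw [ih _ hlen ([c] ++ rest.takeWhile (fun x => !PySem.Chars.isspace x)) false out
          (by simp)
          (fun _ => fun a ha => by
            have := head?_dropWhile (fun x => !PySem.Chars.isspace x) rest a ha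
            simpa using this)]
        simp [countAltGo, hk]
        ring_nf

-- ===== VERDICT (by name: the statement is the Claim_ definition above) =====
theorem count_spec : Claim_equal_count := by
  intro s _
  unfold Spec_count count count_alt
  have := main_lemma s.toList.length s.toList le_rfl [] false [] (by simp) (by simp)
  simpa using this
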